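-- pv_equiv track=rewrite | github.com/billydelectronics/vinyl | app/main.py | pick_best_image
-- ===== SOURCE A (Python) =====
-- from typing import Any, Dict, List, Optional, Tuple
--
-- def pick_best_image(detail: Dict[str, Any]) -> Tuple[Optional[str], Optional[str]]:
--     images = detail.get("images") or []
--     if not images:
--         return None, None
--
--     primary = None
--     secondary = None
--     for img in images:
--         if img.get("type") == "primary" and img.get("uri"):
--             primary = img
--             break
--     if not primary:
--         for img in images:
--             if img.get("uri"):
--                 secondary = img
--                 break
--
--     winner = primary or secondary
--     if not winner:
--         return None, None
--
--     return winner.get("uri"), winner.get("uri150")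
-- ===== SOURCE B (Python) =====
-- def pick_best_image(detail):
--     images = detail.get("images") or []
--     if not images:
--         return None, None
--
--     winner = None
--     fallback = None
--     for img in images:
--         if img.get("uri"):
--             if fallback is None:
--                 fallback = img
--             if img.get("type") == "primary":
--                 winner = img
--                 break
--     if winner is None:
--         winner = fallback
--     if winner is None:
--         return None, None
--     return winner.get("uri"), winner.get("uri150")
-- ===== Notes on version B (the rewrite author's own statement) =====
-- stated objective: simpler
-- what changed: Replaced A's two separate early-exit scans over images (one for a primary image, one for any image with a uri) by a single pass that records the first image with a truthy uri as fallback and breaks on the first primary image with a truthy uri.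
import Mathlib
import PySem

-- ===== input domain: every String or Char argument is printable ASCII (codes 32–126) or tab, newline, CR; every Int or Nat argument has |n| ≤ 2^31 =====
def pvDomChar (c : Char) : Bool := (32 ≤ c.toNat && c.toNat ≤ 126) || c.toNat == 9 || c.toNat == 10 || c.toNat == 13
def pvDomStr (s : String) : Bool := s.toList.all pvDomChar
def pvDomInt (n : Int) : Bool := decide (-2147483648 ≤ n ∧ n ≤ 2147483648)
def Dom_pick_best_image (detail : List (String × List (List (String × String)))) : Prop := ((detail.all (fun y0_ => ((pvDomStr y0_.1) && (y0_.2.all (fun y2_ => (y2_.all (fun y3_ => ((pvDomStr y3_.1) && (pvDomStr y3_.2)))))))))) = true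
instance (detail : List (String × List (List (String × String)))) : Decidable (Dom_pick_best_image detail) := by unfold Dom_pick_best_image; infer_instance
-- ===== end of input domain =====

-- ===== PORT A =====
-- B makes one pass with a fallback instead of A's two early-exit scans (objective: simpler).

-- truthiness of img.get("uri"): None and "" are falsy
def pvTruthy : Option String → Bool
  | some s => s ≠ ""
  | none => false

-- A's first loop: first img with type == "primary" and truthy uri (break)
def pvFindPrimary : List (List (String × String)) → Option (List (String × String))
  | [] => none
  | img :: rest =>
    if img.lookup "type" == some "primary" && pvTruthy (img.lookup "uri") then some img
    else pvFindPrimary rest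

-- A's second loop: first img with truthy uri (break)
def pvFindUri : List (List (String × String)) → Option (List (String × String))
  | [] => none
  | img :: rest =>
    if pvTruthy (img.lookup "uri") then some img
    else pvFindUri rest

def pick_best_image (detail : List (String × List (List (String × String)))) : Option String × Option String :=
  let images := (detail.lookup "images").getD []   -- detail.get("images") or []
  if images = [] then (none, none)
  else
    let primary := pvFindPrimary images
    let secondary := match primary with
      | none => pvFindUri images
      | some _ => none
    let winner := match primary with      -- winner = primary or secondary (both nonempty dicts when set)
      | some p => some p
      | none => secondary
    match winner with
    | none => (none, none)
    | some w => (w.lookup "uri", w.lookup "uri150")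

-- ===== PORT B =====
-- single pass: remember first truthy-uri img as fallback, break on primary with truthy uri
def pvLoopB : List (List (String × String)) → Option (List (String × String)) → Option (List (String × String))
  | [], fb => fb
  | img :: rest, fb =>
    if pvTruthy (img.lookup "uri") then
      let fb' := match fb with
        | none => some img
        | some f => some f
      if img.lookup "type" == some "primary" then some img   -- winner = img; break
      else pvLoopB rest fb'
    else pvLoopB rest fb

def pick_best_image_alt (detail : List (String × List (List (String × String)))) : Option String × Option String :=
  let images := (detail.lookup "images").getD []
  if images = [] then (none, none)
  else
    match pvLoopB images none with
    | none => (none, none)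
    | some w => (w.lookup "uri", w.lookup "uri150")

-- ===== PRECONDITION & SPEC =====
def Spec_pick_best_image (detail : List (String × List (List (String × String)))) (out : Option String × Option String) : Prop := out = pick_best_image_alt detail
instance (detail : List (String × List (List (String × String)))) (out : Option String × Option String) : Decidable (Spec_pick_best_image detail out) := by unfold Spec_pick_best_image; infer_instance

-- ===== CLAIM (what is proved, stated in full; the proofs are below) =====
def Claim_equal_pick_best_image : Prop := ∀ (detail : List (String × List (List (String × String)))), Dom_pick_best_image detail → Spec_pick_best_image detail (pick_best_image detail)

-- ===== LEMMAS AND PROOFS =====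
theorem pvLoopB_eq (l : List (List (String × String))) (fb : Option (List (String × String))) :
    pvLoopB l fb =
      match pvFindPrimary l with
      | some p => some p
      | none => match fb with
        | some f => some f
        | none => pvFindUri l := by
  induction l generalizing fb with
  | nil => cases fb <;> simp [pvLoopB, pvFindPrimary, pvFindUri]
  | cons img rest ih =>
    by_cases hu : pvTruthy (img.lookup "uri")
    · by_cases ht : img.lookup "type" == some "primary"
      · simp [pvLoopB, pvFindPrimary, hu, ht]
      · cases fb <;> simp [pvLoopB, pvFindPrimary, pvFindUri, hu, ht, ih]
    · simp [pvLoopB, pvFindPrimary, pvFindUri, hu, ih]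

-- ===== VERDICT (by name: the statement is the Claim_ definition above) =====
theorem pick_best_image_spec : Claim_equal_pick_best_image := by
  intro detail _
  show pick_best_image detail = pick_best_image_alt detail
  unfold pick_best_image pick_best_image_alt
  set images := (detail.lookup "images").getD [] with himg
  by_cases h : images = []
  · simp [h]
  · simp only [h, if_false]
    rw [pvLoopB_eq]
    cases pvFindPrimary images <;> cases pvFindUri images <;> simp
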